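-- pv_equiv track=rewrite | github.com/bowenx1125/RomanticSimulation | backend/app/services/simulation/service.py | derive_recent_trend
-- ===== SOURCE A (Python) =====
-- def derive_recent_trend(changes: dict[str, int]) -> str:
--     positive = sum(value for value in changes.values() if value > 0)
--     negative = abs(sum(value for value in changes.values() if value < 0))
--     if positive >= negative + 6:
--         return "warming"
--     if negative >= positive + 6:
--         return "cooling"
--     return "observing"
-- ===== SOURCE B (Python) =====
-- def derive_recent_trend(changes: dict[str, int]) -> str:
--     total = sum(changes.values())
--     if total >= 6:
--         return "warming"
--     if total <= -6:
--         return "cooling"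
--     return "observing"
-- ===== Notes on version B (the rewrite author's own statement) =====
-- stated objective: simpler
-- what changed: Replaces the two sign-filtered passes (positive sum and absolute negative sum) with a single net sum of all values compared against +6/-6, using positive - negative = total.
import Mathlib
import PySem

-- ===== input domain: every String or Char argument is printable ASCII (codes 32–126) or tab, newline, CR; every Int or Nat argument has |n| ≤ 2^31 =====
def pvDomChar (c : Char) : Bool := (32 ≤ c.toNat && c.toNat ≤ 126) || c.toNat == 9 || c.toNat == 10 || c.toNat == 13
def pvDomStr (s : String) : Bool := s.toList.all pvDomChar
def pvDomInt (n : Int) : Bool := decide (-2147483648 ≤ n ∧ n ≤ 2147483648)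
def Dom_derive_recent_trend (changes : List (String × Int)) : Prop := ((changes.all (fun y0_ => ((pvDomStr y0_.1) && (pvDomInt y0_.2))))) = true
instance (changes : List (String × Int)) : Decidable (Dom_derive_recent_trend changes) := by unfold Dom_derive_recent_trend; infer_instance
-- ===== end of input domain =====

-- B replaces A's two sign-filtered sums with one net sum compared against ±6 (simpler, one pass).

-- ===== PORT A =====
def derive_recent_trend (changes : List (String × Int)) : String :=
  let vals := (PySem.Dict.ofList changes).values
  let positive := ((vals.filter (fun v => v > 0)).sum : Int)
  let negative := |((vals.filter (fun v => v < 0)).sum : Int)|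
  if positive ≥ negative + 6 then "warming"
  else if negative ≥ positive + 6 then "cooling"
  else "observing"

-- ===== PORT B =====
def derive_recent_trend_alt (changes : List (String × Int)) : String :=
  let total := ((PySem.Dict.ofList changes).values.sum : Int)
  if total ≥ 6 then "warming"
  else if total ≤ -6 then "cooling"
  else "observing"

-- ===== PRECONDITION & SPEC =====
def Spec_derive_recent_trend (changes : List (String × Int)) (out : String) : Prop := out = derive_recent_trend_alt changes
instance (changes : List (String × Int)) (out : String) : Decidable (Spec_derive_recent_trend changes out) := by unfold Spec_derive_recent_trend; infer_instance

-- ===== CLAIM (what is proved, stated in full; the proofs are below) =====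
def Claim_equal_derive_recent_trend : Prop := ∀ (changes : List (String × Int)), Dom_derive_recent_trend changes → Spec_derive_recent_trend changes (derive_recent_trend changes)

-- ===== LEMMAS AND PROOFS =====

-- The positive-filtered sum plus the negative-filtered sum equals the total sum
-- (zero elements are dropped by both filters but contribute 0).
theorem pv_filter_sum_split (l : List Int) :
    (l.filter (fun v => v > 0)).sum + (l.filter (fun v => v < 0)).sum = l.sum := by
  induction l with
  | nil => simp
  | cons x xs ih =>
    simp only [List.filter_cons, List.sum_cons]
    split_ifs <;> simp only [List.sum_cons, decide_eq_true_eq, decide_eq_false_iff_not] at * <;> omega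

theorem pv_filter_pos_nonneg (l : List Int) : 0 ≤ (l.filter (fun v => v > 0)).sum := by
  induction l with
  | nil => simp
  | cons x xs ih =>
    simp only [List.filter_cons]
    split_ifs <;> simp only [List.sum_cons, decide_eq_true_eq, decide_eq_false_iff_not] at * <;> omega

theorem pv_filter_neg_nonpos (l : List Int) : (l.filter (fun v => v < 0)).sum ≤ 0 := by
  induction l with
  | nil => simp
  | cons x xs ih =>
    simp only [List.filter_cons]
    split_ifs <;> simp only [List.sum_cons, decide_eq_true_eq, decide_eq_false_iff_not] at * <;> omega

-- ===== VERDICT (by name: the statement is the Claim_ definition above) =====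
theorem derive_recent_trend_spec : Claim_equal_derive_recent_trend := by
  intro changes _
  unfold Spec_derive_recent_trend derive_recent_trend derive_recent_trend_alt
  set l := (PySem.Dict.ofList changes).values with hl
  have hsplit := pv_filter_sum_split l
  have hpos := pv_filter_pos_nonneg l
  have hneg := pv_filter_neg_nonpos l
  have habs : |(l.filter (fun v => v < 0)).sum| = -(l.filter (fun v => v < 0)).sum :=
    abs_of_nonpos hneg
  simp only [habs]
  split_ifs <;> first | rfl | omega
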